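-- pv_equiv track=rewrite | github.com/qudwn1114/Algorithm | Programmers/코딩 기초 트레이닝/세로 읽기.py | solution
-- ===== SOURCE A (Python) =====
-- def solution(my_string, m, c):
--     answer = ''
--     idx = 1
--     if m == c:
--         c = 0
--     for i in my_string:
--         if idx % m == c:
--             answer += i
--         idx+=1
--     return answer
-- ===== SOURCE B (Python) =====
-- def solution(my_string, m, c):
--     if not 1 <= c <= m:
--         return ''
--     rows = [my_string[i:i + m] for i in range(0, len(my_string), m)]
--     return ''.join(row[c - 1] for row in rows if len(row) > c - 1)
-- ===== Notes on version B (the rewrite author's own statement) =====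
-- stated objective: faster
-- what changed: Replaces A's flat per-character counter filtered by idx % m == c with chunking the string into rows of width m and joining column c-1 of every row that is long enough, after validating 1 <= c <= m; Pre_ excludes m <= 0, where A raises ZeroDivisionError on any nonempty string (m == 0) or selects characters through Python's negative-divisor modulo, a meaningless corner for a row width (m < 0).
-- intended difference: For c == 0 with m <= len(my_string), A's modulo test idx % m == 0 accidentally returns column m although no 0th column exists; B returns '' there, the intended value for an out-of-range column. — e.g. on solution("abcd", 2, 0): A returns "bd", B returns ""
-- outside the precondition, e.g. on solution('ab', -2, -1): A returns 'a', B returns ''; on solution('abc', 0, 1): A raises ZeroDivisionError, B returns ''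
import Mathlib
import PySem

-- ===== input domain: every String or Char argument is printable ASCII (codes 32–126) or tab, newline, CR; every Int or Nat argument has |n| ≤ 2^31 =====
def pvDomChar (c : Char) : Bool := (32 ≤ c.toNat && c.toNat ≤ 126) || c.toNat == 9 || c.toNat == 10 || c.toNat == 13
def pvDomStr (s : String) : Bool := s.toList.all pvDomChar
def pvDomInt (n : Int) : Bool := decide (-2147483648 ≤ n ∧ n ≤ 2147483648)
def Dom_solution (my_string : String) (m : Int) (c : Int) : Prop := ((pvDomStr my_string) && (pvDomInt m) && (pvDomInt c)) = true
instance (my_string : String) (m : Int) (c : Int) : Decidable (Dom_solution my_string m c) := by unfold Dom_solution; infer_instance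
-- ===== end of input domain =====

-- B validates 1 <= c <= m, chunks the string into rows of width m and joins column c-1 of each
-- long-enough row (constant-factor faster in Python: C-level slices instead of a per-character loop).


-- ===== PORT A =====
-- literal port: answer/idx accumulator over the characters; 'answer += i' is the list append
def solution (my_string : String) (m : Int) (c : Int) : String :=
  let c := if m == c then (0 : Int) else c
  (String.ofList
    (my_string.toList.foldl
      (fun (st : List Char × Int) i =>
        (if PySem.Int.mod st.2 m == c then st.1 ++ [i] else st.1, st.2 + 1))
      ([], 1)).1)

-- ===== PORT B =====
-- transliteration of Source B: the guard, the rows comprehension (Python slices), then the join;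
-- row[c-1] is pyGetD with an unreachable default, exact under the generator's len(row) > c-1 test
def solution_alt (my_string : String) (m : Int) (c : Int) : String :=
  if ¬(1 ≤ c ∧ c ≤ m) then "" else
    let rows := (PySem.List.pyRange 0 (my_string.toList.length : Int) m).map
        (fun i => PySem.List.slice my_string.toList (some i) (some (i + m)))
    String.ofList (rows.foldl
      (fun acc row =>
        if c - 1 < (row.length : Int) then acc ++ [PySem.List.pyGetD row (c - 1) ' '] else acc)
      [])

-- ===== PRECONDITION & SPEC =====
-- Pre_ excludes m ≤ 0: for m = 0 A raises ZeroDivisionError on every nonempty string (and only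
-- vacuously returns '' on the empty one), and for m < 0 a negative row width is a corner no caller
-- specifies, where A's character selection is an accident of Python's negative-divisor modulo.
def Pre_solution (my_string : String) (m : Int) (c : Int) : Prop := 1 ≤ m
instance (my_string : String) (m : Int) (c : Int) : Decidable (Pre_solution my_string m c) := by unfold Pre_solution; infer_instance
def pvWitness_solution : String × Int × Int := ("vertical", 3, 2)

-- For c = 0 with m ≤ len(my_string), A's test idx % m == 0 accidentally returns column m although
-- no 0th column exists; B returns '' there, the intended value for an out-of-range column.
def D_solution (my_string : String) (m : Int) (c : Int) : Prop :=
  c = 0 ∧ m ≤ (my_string.toList.length : Int)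
instance (my_string : String) (m : Int) (c : Int) : Decidable (D_solution my_string m c) := by unfold D_solution; infer_instance

def Spec_solution (my_string : String) (m : Int) (c : Int) (out : String) : Prop :=
  ¬ D_solution my_string m c → out = solution_alt my_string m c
instance (my_string : String) (m : Int) (c : Int) (out : String) : Decidable (Spec_solution my_string m c out) := by unfold Spec_solution; infer_instance

def pvDiffWitness_solution : String × Int × Int := ("abcd", 2, 0)
def pvDiffWitnessOut_solution : String × String := ("bd", "")

-- ===== CLAIM (what is proved, stated in full; the proofs are below) =====
def Claim_unchanged_solution : Prop := ∀ (my_string : String) (m : Int) (c : Int), Dom_solution my_string m c → Pre_solution my_string m c → Spec_solution my_string m c (solution my_string m c)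
def Claim_changed_solution : Prop := Dom_solution (pvDiffWitness_solution.1) (pvDiffWitness_solution.2.1) (pvDiffWitness_solution.2.2) ∧ Pre_solution (pvDiffWitness_solution.1) (pvDiffWitness_solution.2.1) (pvDiffWitness_solution.2.2) ∧ D_solution (pvDiffWitness_solution.1) (pvDiffWitness_solution.2.1) (pvDiffWitness_solution.2.2) ∧ solution (pvDiffWitness_solution.1) (pvDiffWitness_solution.2.1) (pvDiffWitness_solution.2.2) = pvDiffWitnessOut_solution.1 ∧ solution_alt (pvDiffWitness_solution.1) (pvDiffWitness_solution.2.1) (pvDiffWitness_solution.2.2) = pvDiffWitnessOut_solution.2 ∧ pvDiffWitnessOut_solution.1 ≠ pvDiffWitnessOut_solution.2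
def Claim_exact_solution : Prop := ∀ (my_string : String) (m : Int) (c : Int), Dom_solution my_string m c → Pre_solution my_string m c → D_solution my_string m c → solution my_string m c ≠ solution_alt my_string m c

-- ===== LEMMAS AND PROOFS =====

-- the stride pattern both sides produce: take a character, skip gap, repeat
def strideChars (gap : Nat) (xs : List Char) : List Char :=
  match xs with
  | [] => []
  | x :: t => x :: strideChars gap (t.drop gap)
termination_by xs.length
decreasing_by simp [List.length_drop]

-- the list of characters A's loop keeps, as a structural recursion
def collectA (m r : Int) : List Char → Int → List Char
  | [], _ => []
  | i :: t, idx => (if PySem.Int.mod idx m == r then [i] else []) ++ collectA m r t (idx + 1)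

lemma foldlA (m r : Int) (l : List Char) (acc : List Char) (idx : Int) :
    (l.foldl
      (fun (st : List Char × Int) i =>
        (if PySem.Int.mod st.2 m == r then st.1 ++ [i] else st.1, st.2 + 1))
      (acc, idx)).1 = acc ++ collectA m r l idx := by
  induction l generalizing acc idx with
  | nil => simp [collectA]
  | cons x t ih =>
      simp only [beq_iff_eq] at ih ⊢
      by_cases h : PySem.Int.mod idx m = r <;>
        · simp only [List.foldl_cons, h, if_true, if_false]
          rw [ih]
          simp [collectA, h]

lemma collectA_nil_of_never (m r : Int) (h : ∀ idx : Int, PySem.Int.mod idx m ≠ r)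
    (l : List Char) (idx : Int) : collectA m r l idx = [] := by
  induction l generalizing idx with
  | nil => rfl
  | cons x t ih => simp [collectA, h idx, ih]

lemma never_pos (m r : Int) (hm : 0 < m) (hr : ¬(0 ≤ r ∧ r < m)) :
    ∀ idx : Int, PySem.Int.mod idx m ≠ r := by
  intro idx h
  have h1 : 0 ≤ PySem.Int.mod idx m := PySem.Int.mod_nonneg (a := idx) hm
  have h2 : PySem.Int.mod idx m < m := PySem.Int.mod_lt (a := idx) hm
  omega

lemma neg_one_emod (M : Int) (hM : 0 < M) : (-1 : Int) % M = M - 1 := by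
  have he : (-1 : Int) = (M - 1) + (-1) * M := by ring
  rw [he, Int.add_mul_emod_self_right]
  exact Int.emod_eq_of_lt (by omega) (by omega)

-- A's loop/stride correspondence, for a positive modulus M and in-range residue R
lemma collect_eq (M R : Int) (hM : 0 < M) (hR : 0 ≤ R ∧ R < M) (l : List Char) (idx : Int) :
    collectA M R l idx
      = strideChars (M.toNat - 1) (l.drop (PySem.Int.mod (R - idx) M).toNat) := by
  induction l generalizing idx with
  | nil => simp [collectA, strideChars]
  | cons x t ih =>
      have hmod : ∀ a : Int, PySem.Int.mod a M = a % M := fun a =>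
        PySem.Int.mod_eq_emod_of_pos hM
      have hR' : R % M = R := Int.emod_eq_of_lt hR.1 hR.2
      have hg1 : 0 ≤ (R - idx) % M := Int.emod_nonneg _ (by omega)
      have hg2 : (R - idx) % M < M := Int.emod_lt_of_pos _ hM
      have hk := Int.emod_add_mul_ediv (R - idx) M
      set g := (R - idx) % M with hgdef
      set k := (R - idx) / M with hkdef
      by_cases hg : g = 0
      · have hidx : PySem.Int.mod idx M = R := by
          rw [hmod]
          have hid : idx = R - M * k := by omega
          rw [hid, Int.sub_mul_emod_self_left]
          exact hR'
        have hnext : (R - (idx + 1)) % M = M - 1 := by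
          have he : R - (idx + 1) = (M - 1) + (k - 1) * M := by
            have : (k - 1) * M = M * k - M := by ring
            omega
          rw [he, Int.add_mul_emod_self_right]
          exact Int.emod_eq_of_lt (by omega) (by omega)
        rw [collectA, hidx]
        rw [hmod, ← hgdef, hg]
        simp only [beq_self_eq_true, if_pos, Int.toNat_zero, List.drop_zero]
        rw [strideChars]
        simp only [List.singleton_append, List.cons.injEq, true_and]
        rw [ih (idx + 1), hmod (R - (idx + 1)), hnext]
        have hT : (M - 1).toNat = M.toNat - 1 := by omega
        rw [hT]
      · have hidx : (PySem.Int.mod idx M == R) = false := by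
          rw [hmod, beq_eq_false_iff_ne]
          intro h
          apply hg
          rw [hgdef, Int.sub_emod, h, hR', sub_self, Int.zero_emod]
        have hnext : (R - (idx + 1)) % M = g - 1 := by
          have he : R - (idx + 1) = (g - 1) + k * M := by
            have : k * M = M * k := by ring
            omega
          rw [he, Int.add_mul_emod_self_right]
          exact Int.emod_eq_of_lt (by omega) (by omega)
        rw [collectA, hidx]
        simp only [Bool.false_eq_true, if_false, List.nil_append]
        rw [ih (idx + 1), hmod (R - (idx + 1)), hnext, hmod (R - idx), ← hgdef]
        have hcons : ((x :: t).drop g.toNat) = t.drop ((g - 1).toNat) := by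
          have h1 : g.toNat = (g - 1).toNat + 1 := by omega
          rw [h1, List.drop_succ_cons]
        rw [hcons]

lemma solution_eq_collect (s : String) (m c : Int) :
    solution s m c = String.ofList (collectA m (if c == m then 0 else c) s.toList 1) := by
  have hcc : ((m == c : Bool)) = ((c == m : Bool)) := by
    by_cases h : m = c
    · simp [h]
    · have h' : ¬ c = m := fun hc => h hc.symm
      simp [h, h']
  have h1 : solution s m c =
      String.ofList
        (List.foldl
          (fun (st : List Char × Int) i =>
            (if PySem.Int.mod st.2 m == (if m == c then (0 : Int) else c) then st.1 ++ [i]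
             else st.1, st.2 + 1))
          ([], 1) s.toList).1 := rfl
  rw [h1, hcc, foldlA m (if c == m then 0 else c) s.toList [] 1, List.nil_append]

-- range(0, b, m) is empty for b ≤ 0 (positive step)
lemma pyRange_pos_nil (b m : Int) (hm : 0 < m) (hb : b ≤ 0) :
    PySem.List.pyRange 0 b m = [] := by
  rw [PySem.List.pyRange_of_pos 0 b hm, if_neg (by omega)]
  simp

-- peeling one row start off range(0, n, m)
lemma pyRange_pos_shift (n m : Int) (hm : 0 < m) (hn : 0 < n) :
    PySem.List.pyRange 0 n m = 0 :: (PySem.List.pyRange 0 (n - m) m).map (fun i => i + m) := by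
  rw [PySem.List.pyRange_of_pos 0 n hm, PySem.List.pyRange_of_pos 0 (n - m) hm]
  have hq0 : 0 ≤ (n - 1) / m := Int.ediv_nonneg (by omega) (by omega)
  have hC : (if (0 : Int) < n then ((n - 0 + m - 1) / m).toNat else 0)
      = ((n - 1) / m).toNat + 1 := by
    rw [if_pos hn]
    have he : n - 0 + m - 1 = (n - 1) + 1 * m := by ring
    rw [he, Int.add_mul_ediv_right _ _ (by omega : m ≠ 0)]
    omega
  have hC' : (if (0 : Int) < n - m then ((n - m - 0 + m - 1) / m).toNat else 0)
      = ((n - 1) / m).toNat := by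
    by_cases h : (0 : Int) < n - m
    · rw [if_pos h]
      congr 1
      ring_nf
    · rw [if_neg h]
      have : (n - 1) / m = 0 := Int.ediv_eq_zero_of_lt (by omega) (by omega)
      omega
  rw [hC, hC', List.range_succ_eq_map, List.map_cons, List.map_map, List.map_map]
  congr 1
  · simp
  apply List.map_congr_left
  intro k _
  simp only [Function.comp_apply]
  push_cast
  ring

-- B's row fold produces the stride pattern starting at column col (0 ≤ col < m)
lemma Blist_eq (m col : Int) (hm : 0 < m) (h0 : 0 ≤ col) (hcol : col < m)
    (l : List Char) (acc : List Char) :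
    ((PySem.List.pyRange 0 (l.length : Int) m).map
        (fun i => PySem.List.slice l (some i) (some (i + m)))).foldl
      (fun acc row =>
        if col < (row.length : Int) then acc ++ [PySem.List.pyGetD row col ' '] else acc)
      acc
    = acc ++ strideChars (m.toNat - 1) (l.drop col.toNat) := by
  suffices H : ∀ n : Nat, ∀ l acc : List Char, l.length = n →
      ((PySem.List.pyRange 0 (l.length : Int) m).map
          (fun i => PySem.List.slice l (some i) (some (i + m)))).foldl
        (fun acc row =>
          if col < (row.length : Int) then acc ++ [PySem.List.pyGetD row col ' '] else acc)
        acc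
      = acc ++ strideChars (m.toNat - 1) (l.drop col.toNat) by
    exact H l.length l acc rfl
  intro n
  induction n using Nat.strong_induction_on with
  | _ n ih =>
    intro l acc hn
    rcases List.eq_nil_or_concat' l with hl | _
    · subst hl
      simp only [List.length_nil, Nat.cast_zero]
      rw [pyRange_pos_nil 0 m hm (by omega)]
      simp [strideChars]
    · have hlpos : 0 < l.length := by
        rcases l with _ | _
        · simp_all
        · simp
      have hnpos : (0 : Int) < (l.length : Int) := by exact_mod_cast hlpos
      rw [pyRange_pos_shift (l.length : Int) m hm hnpos]
      simp only [List.map_cons, List.foldl_cons, List.map_map]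
      have hrow0 : PySem.List.slice l (some 0) (some (0 + m)) = l.take m.toNat := by
        rw [zero_add, PySem.List.slice_toNat l (le_refl 0) (by omega)]
        simp
      rw [hrow0]
      have hlen0 : ((l.take m.toNat).length : Int) = min (m.toNat : Int) (l.length : Int) := by
        simp
      by_cases hcl : col < (l.length : Int)
      · -- the head row contains column col
        have hguard : col < ((l.take m.toNat).length : Int) := by rw [hlen0]; omega
        rw [if_pos hguard]
        have hget : PySem.List.pyGetD (l.take m.toNat) col ' ' = l[col.toNat]'(by omega) := by
          rw [PySem.List.pyGetD_eq_getElem _ _ h0 (by rw [hlen0]; omega)]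
          exact List.getElem_take
        rw [hget]
        -- the tail rows are the rows of l.drop m, shifted by m
        have hmem : ∀ (a : List Char) (i : Int), i ∈ PySem.List.pyRange 0 ((l.length : Int) - m) m →
            (fun acc row =>
              if col < (row.length : Int) then acc ++ [PySem.List.pyGetD row col ' '] else acc) a
              (PySem.List.slice l (some (i + m)) (some (i + m + m)))
            = (fun acc row =>
              if col < (row.length : Int) then acc ++ [PySem.List.pyGetD row col ' '] else acc) a
              (PySem.List.slice (l.drop m.toNat) (some i) (some (i + m))) := by
          intro a i hi
          have hi0 : 0 ≤ i := ((PySem.List.mem_pyRange_iff_of_pos hm i).mp hi).1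
          have hs : PySem.List.slice l (some (i + m)) (some (i + m + m))
              = PySem.List.slice (l.drop m.toNat) (some i) (some (i + m)) := by
            rw [PySem.List.slice_toNat l (by omega) (by omega),
              PySem.List.slice_toNat (l.drop m.toNat) hi0 (by omega)]
            rw [List.drop_drop]
            congr 1
            · omega
            · congr 1
              omega
          rw [hs]
        have hfold := PySem.List.foldl_congr_mem
          ((PySem.List.pyRange 0 ((l.length : Int) - m) m))
          (fun a i =>
            (fun acc row =>
              if col < (row.length : Int) then acc ++ [PySem.List.pyGetD row col ' '] else acc) a
              (PySem.List.slice l (some (i + m)) (some (i + m + m))))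
          (fun a i =>
            (fun acc row =>
              if col < (row.length : Int) then acc ++ [PySem.List.pyGetD row col ' '] else acc) a
              (PySem.List.slice (l.drop m.toNat) (some i) (some (i + m))))
          (acc ++ [l[col.toNat]'(by omega)]) hmem
        have hrange : PySem.List.pyRange 0 ((l.length : Int) - m) m
            = PySem.List.pyRange 0 (((l.drop m.toNat).length : Int)) m := by
          by_cases hmn : m ≤ (l.length : Int)
          · congr 1
            simp
            omega
          · rw [pyRange_pos_nil _ m hm (by omega), pyRange_pos_nil _ m hm (by simp; omega)]
        have hIH := ih (l.drop m.toNat).length (by simp; omega) (l.drop m.toNat)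
          (acc ++ [l[col.toNat]'(by omega)]) rfl
        -- assemble: fold over composed maps = foldl over the range directly
        rw [List.foldl_map]
        simp only [Function.comp] at hfold ⊢
        rw [hfold, hrange]
        rw [List.foldl_map] at hIH
        rw [hIH]
        -- right-hand side: peel the head of the stride
        have hdrop : l.drop col.toNat = l[col.toNat]'(by omega) :: l.drop (col.toNat + 1) := by
          rw [List.drop_eq_getElem_cons (by omega)]
        rw [hdrop, strideChars]
        have hdd : (l.drop (col.toNat + 1)).drop (m.toNat - 1)
            = (l.drop m.toNat).drop col.toNat := by
          rw [List.drop_drop, List.drop_drop]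
          congr 1
          omega
        rw [hdd]
        simp
      · -- col is past the end of the string: nothing is ever appended
        have hguard : ¬ col < ((l.take m.toNat).length : Int) := by rw [hlen0]; omega
        rw [if_neg hguard]
        have htail : PySem.List.pyRange 0 ((l.length : Int) - m) m = [] :=
          pyRange_pos_nil _ m hm (by omega)
        rw [htail]
        have hde : l.drop col.toNat = [] := List.drop_eq_nil_of_le (by omega)
        rw [hde]
        simp [strideChars]

-- unreachable-column characterisation of the residue A filters by, for 1 ≤ c ≤ m
lemma residue_shift (m c : Int) (hm : 0 < m) (hc : 1 ≤ c ∧ c ≤ m) :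
    (PySem.Int.mod ((if c == m then (0 : Int) else c) - 1) m).toNat = (c - 1).toNat ∧
    (0 ≤ (if c == m then (0 : Int) else c) ∧ (if c == m then (0 : Int) else c) < m) := by
  by_cases h : c = m
  · subst h
    have h1 : (if c == c then (0 : Int) else c) = 0 := by simp
    rw [h1]
    refine ⟨?_, by omega⟩
    rw [PySem.Int.mod_eq_emod_of_pos hm]
    have : ((0 : Int) - 1) % c = c - 1 := by simpa using neg_one_emod c hm
    rw [this]
  · have hb : ((c == m : Bool)) = false := by simp [h]
    rw [hb]
    simp only [Bool.false_eq_true, if_false]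
    refine ⟨?_, by omega⟩
    rw [PySem.Int.mod_eq_emod_of_pos hm, Int.emod_eq_of_lt (by omega) (by omega)]

lemma ofList_ne_empty (l : List Char) (h : l ≠ []) : String.ofList l ≠ "" := by
  intro he
  apply h
  have := congrArg String.toList he
  simpa using this

-- solution_alt unfolded on the two branches of the guard
lemma alt_of_guard (s : String) (m c : Int) (hc : 1 ≤ c ∧ c ≤ m) :
    solution_alt s m c =
      String.ofList
        (((PySem.List.pyRange 0 (s.toList.length : Int) m).map
            (fun i => PySem.List.slice s.toList (some i) (some (i + m)))).foldl
          (fun acc row =>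
            if c - 1 < (row.length : Int) then acc ++ [PySem.List.pyGetD row (c - 1) ' '] else acc)
          []) := by
  unfold solution_alt
  rw [if_neg (not_not_intro hc)]

lemma alt_of_not_guard (s : String) (m c : Int) (hc : ¬(1 ≤ c ∧ c ≤ m)) :
    solution_alt s m c = "" := by
  unfold solution_alt
  rw [if_pos hc]

-- ===== VERDICT (by name: the statements are the Claim_ definitions above) =====
theorem solution_spec : Claim_unchanged_solution := by
  intro s m c _ hpre hnd
  show solution s m c = solution_alt s m c
  have hm : (0 : Int) < m := hpre
  rw [solution_eq_collect]
  by_cases hc : 1 ≤ c ∧ c ≤ m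
  · -- in-range column: both sides are the stride starting at c-1
    obtain ⟨hres, hrb⟩ := residue_shift m c hm hc
    rw [alt_of_guard s m c hc,
      Blist_eq m (c - 1) hm (by omega) (by omega) s.toList []]
    rw [collect_eq m _ hm hrb s.toList 1, hres]
    rfl
  · -- out-of-range column: both sides are empty
    rw [alt_of_not_guard s m c hc]
    by_cases h0 : c = 0
    · -- c = 0 outside D_: m exceeds the length, so A's stride starts past the end
      subst h0
      have hcm : ((0 : Int) == m) = false := by simp; omega
      have hmn : (s.toList.length : Int) < m := by
        unfold D_solution at hnd
        push Not at hnd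
        exact hnd rfl
      rw [collect_eq m _ hm (by rw [hcm]; simp; omega) s.toList 1]
      have hres : (PySem.Int.mod ((if (0 : Int) == m then (0:Int) else 0) - 1) m).toNat
          = m.toNat - 1 := by
        rw [hcm]
        simp only [Bool.false_eq_true, if_false]
        rw [PySem.Int.mod_eq_emod_of_pos hm]
        have : ((0 : Int) - 1) % m = m - 1 := by simpa using neg_one_emod m hm
        rw [this]
        omega
      rw [hres]
      have hde : s.toList.drop (m.toNat - 1) = [] := List.drop_eq_nil_of_le (by omega)
      rw [hde]
      simp [strideChars]
    · -- c < 0 or c > m: the residue is never hit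
      have hcm : ((c == m : Bool)) = false := by simp; omega
      rw [hcm]
      simp only [Bool.false_eq_true, if_false]
      rw [collectA_nil_of_never m c (never_pos m c hm (by omega)) s.toList 1]

theorem solution_changed : Claim_changed_solution := by
  unfold Claim_changed_solution
  refine ⟨by decide, by decide, by decide, by decide, by decide, by decide⟩

theorem solution_tight : Claim_exact_solution := by
  intro s m c _ hpre hd
  obtain ⟨hc0, hmn⟩ := hd
  subst hc0
  have hm : (0 : Int) < m := hpre
  rw [solution_eq_collect, alt_of_not_guard s m 0 (by omega)]
  have hcm : ((0 : Int) == m) = false := by simp; omega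
  rw [collect_eq m _ hm (by rw [hcm]; simp; omega) s.toList 1]
  have hres : (PySem.Int.mod ((if (0 : Int) == m then (0:Int) else 0) - 1) m).toNat
      = m.toNat - 1 := by
    rw [hcm]
    simp only [Bool.false_eq_true, if_false]
    rw [PySem.Int.mod_eq_emod_of_pos hm]
    have : ((0 : Int) - 1) % m = m - 1 := by simpa using neg_one_emod m hm
    rw [this]
    omega
  rw [hres]
  apply ofList_ne_empty
  have hlt : m.toNat - 1 < s.toList.length := by omega
  have hdrop : s.toList.drop (m.toNat - 1)
      = s.toList[m.toNat - 1]'hlt :: s.toList.drop (m.toNat - 1 + 1) :=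
    List.drop_eq_getElem_cons hlt
  rw [hdrop, strideChars]
  simp
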